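-- pv_equiv track=rewrite | github.com/lunchRamen/coding_test | Programmers/n^2배열자르기.py | solution
-- ===== SOURCE A (Python) =====
-- def solution(n, left, right):
--     answer = []
--     arr=[i+1 for i in range(n)]
--
--     temp=n
--     while left>=temp:
--         temp+=n
--     temp-=n
--     start=temp//n
--     while right>=temp:
--         temp+=n
--     temp-=n
--     end=temp//n
--
--     for i in range(start,end+1):
--         for j in range(i,-1,-1):
--             arr[j]=arr[i]
--         answer+=arr
--     temp=left
--     left=left%n
--     right=left+(right-temp)
--     answer=answer[left:right+1]
--
--     return answer
-- ===== SOURCE B (Python) =====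
-- def solution(n, left, right):
--     return [max(k // n, k % n) + 1 for k in range(left, right + 1)]
-- ===== Notes on version B (the rewrite author's own statement) =====
-- stated objective: alternative
-- what changed: Replaces A's simulation (two counting while-loops to find the row span, building each n-length row by in-place overwriting, concatenating whole rows, then slicing) with the closed-form entry max(k//n, k%n)+1 evaluated only at the requested indices left..right.
-- outside the precondition, e.g. on solution(2, -1, 1): A returns [2], B returns [2, 1, 2]
import Mathlib
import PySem

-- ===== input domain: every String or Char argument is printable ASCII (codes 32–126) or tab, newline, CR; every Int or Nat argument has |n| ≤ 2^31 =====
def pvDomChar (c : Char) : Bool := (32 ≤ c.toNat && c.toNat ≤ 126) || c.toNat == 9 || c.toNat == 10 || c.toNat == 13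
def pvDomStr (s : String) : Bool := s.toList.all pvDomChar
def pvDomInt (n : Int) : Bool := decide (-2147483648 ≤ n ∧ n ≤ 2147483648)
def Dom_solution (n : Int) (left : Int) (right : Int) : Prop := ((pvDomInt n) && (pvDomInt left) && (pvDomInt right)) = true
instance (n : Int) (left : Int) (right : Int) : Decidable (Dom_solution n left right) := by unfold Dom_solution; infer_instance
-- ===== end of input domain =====

-- B replaces A's row-building simulation with the closed-form entry max(k//n, k%n)+1 at each requested index.


-- ===== PORT A =====
-- 'while bound >= temp: temp += n' — fuel only makes the loop total; on Pre_ inputs the fuel suffices (proved below).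
def pvWhileAdd (bound n : Int) : Nat → Int → Int
  | 0, temp => temp
  | fuel + 1, temp => if bound ≥ temp then pvWhileAdd bound n fuel (temp + n) else temp

-- 'for j in range(i,-1,-1): arr[j] = arr[i]' — indices are in range on Pre_ inputs (Python raises IndexError otherwise).
def pvInner (i : Int) (arr : List Int) : List Int :=
  (PySem.List.pyRange i (-1) (-1)).foldl (fun a j => a.set j.toNat (PySem.List.pyGetD a i 0)) arr

def solution (n : Int) (left : Int) (right : Int) : List Int :=
  let answer : List Int := []
  let arr := (PySem.List.pyRange 0 n 1).map (· + 1)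
  let temp1 := pvWhileAdd left n (left.toNat + 1) n
  let temp1' := temp1 - n
  let start := PySem.Int.floordiv temp1' n
  let temp2 := pvWhileAdd right n (right.toNat + n.toNat + 1) temp1'
  let temp2' := temp2 - n
  let e := PySem.Int.floordiv temp2' n
  let st := (PySem.List.pyRange start (e + 1) 1).foldl
      (fun (s : List Int × List Int) i => let a := pvInner i s.1; (a, s.2 ++ a)) (arr, answer)
  let temp := left
  let left2 := PySem.Int.mod left n
  let right2 := left2 + (right - temp)
  PySem.List.slice st.2 (some left2) (some (right2 + 1))

-- ===== PORT B =====
def solution_alt (n : Int) (left : Int) (right : Int) : List Int :=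
  (PySem.List.pyRange left (right + 1) 1).map
    (fun k => max (PySem.Int.floordiv k n) (PySem.Int.mod k n) + 1)

-- ===== PRECONDITION & SPEC =====
-- Pre_ keeps the problem's guaranteed domain (1 ≤ n, 0 ≤ left) and the inputs where A's row walk
-- stays inside the n-element row buffer: for n ≤ 0 A never terminates, for right ≥ n² with
-- right ≥ n·(left/n) A raises IndexError, and for left < 0 (outside the stated domain) A slices
-- with a wrapped index, a corner no caller specifies.
def Pre_solution (n : Int) (left : Int) (right : Int) : Prop :=
  1 ≤ n ∧ 0 ≤ left ∧ (right < n * n ∨ right < n * (left / n))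
instance (n : Int) (left : Int) (right : Int) : Decidable (Pre_solution n left right) := by
  unfold Pre_solution; infer_instance

def pvWitness_solution : Int × Int × Int := (3, 2, 7)

def Spec_solution (n : Int) (left : Int) (right : Int) (out : List Int) : Prop := out = solution_alt n left right
instance (n : Int) (left : Int) (right : Int) (out : List Int) : Decidable (Spec_solution n left right out) := by unfold Spec_solution; infer_instance

-- ===== CLAIM (what is proved, stated in full; the proofs are below) =====
def Claim_equal_solution : Prop := ∀ (n : Int) (left : Int) (right : Int), Dom_solution n left right → Pre_solution n left right → Spec_solution n left right (solution n left right)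

-- ===== LEMMAS AND PROOFS =====

-- the value of one cell of the flattened array
def pvF (n k : Int) : Int := max (PySem.Int.floordiv k n) (PySem.Int.mod k n) + 1

-- the content of arr after the row-i inner loop
def pvRow (n i : Int) : List Int := (PySem.List.pyRange 0 n 1).map (fun j => max i j + 1)

-- guard false: the loop returns temp unchanged
theorem pvWhileAdd_of_gt (bound n : Int) (fuel : Nat) (temp : Int) (h : bound < temp) :
    pvWhileAdd bound n fuel temp = temp := by
  cases fuel <;> simp [pvWhileAdd, not_le.mpr h]

-- the while loop lands on the least multiple of n strictly above bound
theorem pvWhileAdd_spec (bound n : Int) (hn : 1 ≤ n) :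
    ∀ (fuel : Nat) (temp : Int), n ∣ temp → temp ≤ n * (bound / n + 1) →
      (n * (bound / n + 1) - temp).toNat ≤ fuel →
      pvWhileAdd bound n fuel temp = n * (bound / n + 1) := by
  intro fuel
  induction fuel with
  | zero =>
    intro temp _ hle hf
    have : temp = n * (bound / n + 1) := by omega
    simpa [pvWhileAdd] using this
  | succ fuel ih =>
    intro temp hdvd hle hf
    have hq : n * (bound / n) + bound % n = bound := Int.ediv_add_emod bound n
    have hr1 : n * (bound / n + 1) = n * (bound / n) + n := by ring
    have hm0 : 0 ≤ bound % n := Int.emod_nonneg bound (by omega)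
    have hm1 : bound % n < n := Int.emod_lt_of_pos bound (by omega)
    rw [pvWhileAdd]
    by_cases hg : bound ≥ temp
    · rw [if_pos hg]
      obtain ⟨c, hc⟩ := hdvd
      have h3 : n * (c + 1) = n * c + n := by ring
      have hcq : c ≤ bound / n := by
        by_contra hlt
        push_neg at hlt
        have : n * (bound / n + 1) ≤ n * c := by
          apply mul_le_mul_of_nonneg_left (by omega) (by omega)
        omega
      have hstep : temp + n ≤ n * (bound / n + 1) := by
        have h2 : n * (c + 1) ≤ n * (bound / n + 1) := by
          apply mul_le_mul_of_nonneg_left (by omega) (by omega)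
        omega
      exact ih (temp + n) ⟨c + 1, by omega⟩ hstep (by omega)
    · rw [if_neg hg]
      push_neg at hg
      obtain ⟨c, hc⟩ := hdvd
      have hcq : bound / n + 1 ≤ c := by
        by_contra hlt
        push_neg at hlt
        have : n * c ≤ n * (bound / n) := by
          apply mul_le_mul_of_nonneg_left (by omega) (by omega)
        omega
      have : n * (bound / n + 1) ≤ n * c := by
        apply mul_le_mul_of_nonneg_left (by omega) (by omega)
      omega

-- slicing the empty list gives the empty list
theorem pvSliceNil (a b : Int) : PySem.List.slice ([] : List Int) (some a) (some b) = [] := by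
  have h := PySem.List.length_slice ([] : List Int) a b
  have ha := PySem.List.clampIdx_le ([] : List Int).length a
  have hb := PySem.List.clampIdx_le ([] : List Int).length b
  simp only [List.length_nil, Nat.le_zero] at h ha hb
  apply List.eq_nil_of_length_eq_zero
  omega

-- the descending inner loop overwrites positions 0..j with the (invariant) value at position i
theorem pvSetPrefix (i v : Int) :
    ∀ (j : Nat) (arr : List Int), (j : Int) ≤ i → i.toNat < arr.length →
      PySem.List.pyGetD arr i 0 = v →
      (PySem.List.pyRange (j : Int) (-1) (-1)).foldl
          (fun a t => a.set t.toNat (PySem.List.pyGetD a i 0)) arr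
        = List.replicate (j + 1) v ++ arr.drop (j + 1) := by
  intro j
  induction j with
  | zero =>
    intro arr _ hlen hv
    rw [PySem.List.pyRange_neg_one_cons (by omega)]
    rw [PySem.List.pyRange_neg_one_eq_nil (by omega)]
    cases arr with
    | nil => simp at hlen
    | cons x xs => simp [hv]
  | succ j ih =>
    intro arr hji hlen hv
    have h0i : (0:Int) ≤ i := le_trans (by positivity) hji
    have hjlt : j + 1 ≤ i.toNat := by omega
    rw [PySem.List.pyRange_neg_one_cons (by push_cast; omega)]
    rw [show ((j+1 : Nat) : Int) - 1 = ((j : Nat) : Int) by push_cast; ring]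
    simp only [List.foldl_cons, hv]
    rw [show ((j+1 : Nat) : Int).toNat = j + 1 by omega]
    rw [ih (arr.set (j+1) v) (by push_cast at hji ⊢; omega) (by simpa using hlen)
      (by
        rw [PySem.List.pyGetD_of_nonneg _ _ h0i] at hv ⊢
        rw [List.getD_eq_getElem?_getD, List.getElem?_set]
        rw [List.getD_eq_getElem?_getD] at hv
        split_ifs with h1 h2
        · simp
        · omega
        · exact hv)]
    rw [List.drop_set, if_neg (by omega), Nat.sub_self]
    rw [show (List.drop (j+1) arr).set 0 v = v :: List.drop (j+1+1) arr from by
      rw [List.drop_eq_getElem_cons (by omega : j + 1 < arr.length)]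
      rfl]
    simp [List.replicate_succ']

-- one pass of the inner loop turns row i' into row i
theorem pvInner_row (n i i' : Int) (hn : 1 ≤ n) (h0 : 0 ≤ i') (hi' : i' ≤ i) (hin : i < n) :
    pvInner i (pvRow n i') = pvRow n i := by
  have h0i : 0 ≤ i := le_trans h0 hi'
  have hlen : (pvRow n i').length = n.toNat := by
    simp [pvRow, PySem.List.length_pyRange_one]
  unfold pvInner
  rw [show i = ((i.toNat : Nat) : Int) by omega] 
  rw [pvSetPrefix _ (i+1) i.toNat (pvRow n i') (by omega) (by omega)
    (by
      rw [show (((i.toNat : Nat)) : Int) = i by omega]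
      unfold pvRow
      rw [PySem.List.pyGetD_map_pyRange_of_nonneg _ n i 0 h0i hin]
      omega)]
  rw [show (((i.toNat : Nat)) : Int) = i by omega]
  apply List.ext_getElem
  · simp [pvRow, PySem.List.length_pyRange_one]
    omega
  · intro p h1 h2
    have hp : p < n.toNat := by
      simp [pvRow, PySem.List.length_pyRange_one] at h2; omega
    by_cases hpi : p < i.toNat + 1
    · rw [List.getElem_append_left (by simpa using hpi)]
      rw [List.getElem_replicate]
      simp only [pvRow, List.getElem_map, PySem.List.getElem_pyRange_one]
      have : ((p : Int)) ≤ i := by omega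
      omega
    · rw [List.getElem_append_right (by simpa using hpi)]
      rw [List.getElem_drop]
      simp only [pvRow, List.getElem_map, PySem.List.getElem_pyRange_one,
        List.length_replicate]
      have hgt : i < ((i.toNat + 1 + (p - (i.toNat + 1))) : Nat) := by omega
      have hgt' : i' ≤ ((i.toNat + 1 + (p - (i.toNat + 1))) : Nat) := by omega
      omega

-- the outer loop appends rows s, s+1, … to the answer
theorem pvOuter_fold (n : Int) (hn : 1 ≤ n) :
    ∀ (cnt : Nat) (s i' : Int) (ans : List Int), 0 ≤ i' → i' ≤ s → s + cnt ≤ n →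
      ((PySem.List.pyRange s (s + cnt) 1).foldl
          (fun (st : List Int × List Int) i => let a := pvInner i st.1; (a, st.2 ++ a))
          (pvRow n i', ans)).2
        = ans ++ ((PySem.List.pyRange s (s + cnt) 1).map (fun i => pvRow n i)).flatten := by
  intro cnt
  induction cnt with
  | zero =>
    intro s i' ans _ _ _
    rw [PySem.List.pyRange_one_eq_nil (by push_cast; omega)]
    simp
  | succ cnt ih =>
    intro s i' ans h0 hi's hsn
    rw [PySem.List.pyRange_one_cons (by push_cast; omega)]
    simp only [List.foldl_cons, List.map_cons, List.flatten_cons]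
    have hrow : pvInner s (pvRow n i') = pvRow n s :=
      pvInner_row n s i' hn h0 hi's (by push_cast at hsn; omega)
    simp only [hrow]
    have hb : s + ((cnt + 1 : Nat) : Int) = (s + 1) + (cnt : Int) := by push_cast; ring
    rw [hb]
    rw [ih (s + 1) s (ans ++ pvRow n s) (le_trans h0 hi's) (by omega) (by push_cast at hsn ⊢; omega)]
    simp

-- one row is the f-image of its index range
theorem pvRow_eq_map_pvF (n i : Int) (hn : 1 ≤ n) (hi : 0 ≤ i) :
    pvRow n i = (PySem.List.pyRange (i * n) (i * n + n) 1).map (pvF n) := by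
  apply List.ext_getElem
  · simp [pvRow, PySem.List.length_pyRange_one]
  · intro p h1 h2
    have hp : p < n.toNat := by
      simp [pvRow, PySem.List.length_pyRange_one] at h1; omega
    simp only [pvRow, pvF, List.getElem_map, PySem.List.getElem_pyRange_one]
    have hfd : PySem.Int.floordiv (i * n + p) n = i := by
      rw [PySem.Int.floordiv_eq_iff_of_pos (by omega)]
      refine ⟨by nlinarith [Int.natCast_nonneg p], ?_⟩
      have h3 : (i + 1) * n = i * n + n := by ring
      omega
    have hmod := PySem.Int.floordiv_mul_add_mod (i * n + p) n
    rw [hfd] at hmod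
    rw [hfd]
    have hmn : i * n = n * i := by ring
    have hm : PySem.Int.mod (i * n + p) n = (p : Int) := by omega
    rw [hm]
    omega

-- concatenating rows s..s+cnt-1 is the f-image of the flat index range
theorem pvFlatten_rows (n : Int) (hn : 1 ≤ n) :
    ∀ (cnt : Nat) (s : Int), 0 ≤ s →
      ((PySem.List.pyRange s (s + cnt) 1).map (fun i => pvRow n i)).flatten
        = (PySem.List.pyRange (s * n) ((s + cnt) * n) 1).map (pvF n) := by
  intro cnt
  induction cnt with
  | zero =>
    intro s _
    rw [PySem.List.pyRange_one_eq_nil (by simp),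
      PySem.List.pyRange_one_eq_nil (by simp)]
    simp
  | succ cnt ih =>
    intro s hs
    rw [PySem.List.pyRange_one_cons (by push_cast; omega)]
    simp only [List.map_cons, List.flatten_cons]
    have hb : s + ((cnt + 1 : Nat) : Int) = (s + 1) + (cnt : Int) := by push_cast; ring
    rw [hb, ih (s + 1) (by omega)]
    rw [pvRow_eq_map_pvF n s hn hs]
    rw [PySem.List.pyRange_one_append (s * n) ((s + 1) * n) (((s + 1) + (cnt : Int)) * n)
      (by nlinarith) (by nlinarith [Int.natCast_nonneg cnt])]
    rw [List.map_append]
    congr 2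
    ring

-- the initial arr [1, …, n] is row 0
theorem pvArr_init (n : Int) :
    (PySem.List.pyRange 0 n 1).map (· + 1) = pvRow n 0 := by
  unfold pvRow
  apply List.map_congr_left
  intro j hj
  rw [PySem.List.mem_pyRange_one] at hj
  omega

theorem solution_spec' (n l r : Int) (hn : 1 ≤ n) (hl : 0 ≤ l) (hr : r < n * n ∨ r < n * (l / n)) :
    solution n l r = solution_alt n l r := by
  have hn0 : (0:Int) < n := by omega
  have hql : n * (l / n) + l % n = l := Int.ediv_add_emod l n
  have hml0 : 0 ≤ l % n := Int.emod_nonneg l (by omega)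
  have hml1 : l % n < n := Int.emod_lt_of_pos l hn0
  have hq0 : 0 ≤ l / n := Int.ediv_nonneg hl (by omega)
  have hr1 : n * (l / n + 1) = n * (l / n) + n := by ring
  have h1 : pvWhileAdd l n (l.toNat + 1) n = n * (l / n + 1) := by
    apply pvWhileAdd_spec l n hn (l.toNat + 1) n ⟨1, by ring⟩ (by nlinarith) (by omega)
  have hT1 : n * (l / n + 1) - n = n * (l / n) := by ring
  have hstart : PySem.Int.floordiv (n * (l / n)) n = l / n := by
    rw [PySem.Int.floordiv_eq_ediv_of_pos hn0, mul_comm, Int.mul_ediv_cancel _ (by omega)]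
  have hpvF : (fun k => max (PySem.Int.floordiv k n) (PySem.Int.mod k n) + 1) = pvF n := rfl
  unfold solution solution_alt
  simp only [h1, hT1, hstart, hpvF]
  by_cases hA : r < n * (l / n)
  · -- the requested window ends before the first generated row: both sides are empty
    rw [pvWhileAdd_of_gt r n _ _ hA]
    rw [show n * (l / n) - n = n * (l / n - 1) by ring]
    rw [show PySem.Int.floordiv (n * (l / n - 1)) n = l / n - 1 from by
      rw [PySem.Int.floordiv_eq_ediv_of_pos hn0, mul_comm, Int.mul_ediv_cancel _ (by omega)]]
    rw [show l / n - 1 + 1 = l / n by ring]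
    rw [PySem.List.pyRange_one_eq_nil (le_refl (l / n))]
    rw [PySem.List.pyRange_one_eq_nil (by omega : r + 1 ≤ l)]
    simp only [List.foldl_nil, List.map_nil]
    exact pvSliceNil _ _
  · push_neg at hA
    have hrnn : r < n * n := by
      rcases hr with h | h
      · exact h
      · omega
    have hqr : n * (r / n) + r % n = r := Int.ediv_add_emod r n
    have hmr0 : 0 ≤ r % n := Int.emod_nonneg r (by omega)
    have hmr1 : r % n < n := Int.emod_lt_of_pos r hn0
    have hr0 : 0 ≤ r := le_trans (by positivity) hA
    have hqr0 : 0 ≤ r / n := Int.ediv_nonneg hr0 (by omega)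
    have hr2 : n * (r / n + 1) = n * (r / n) + n := by ring
    have hT1nn : 0 ≤ n * (l / n) := by positivity
    have h2 : pvWhileAdd r n (r.toNat + n.toNat + 1) (n * (l / n)) = n * (r / n + 1) := by
      apply pvWhileAdd_spec r n hn _ _ ⟨l / n, rfl⟩ (by omega) (by omega)
    have hT2 : n * (r / n + 1) - n = n * (r / n) := by ring
    have hend : PySem.Int.floordiv (n * (r / n)) n = r / n := by
      rw [PySem.Int.floordiv_eq_ediv_of_pos hn0, mul_comm, Int.mul_ediv_cancel _ (by omega)]
    rw [h2]
    simp only [hT2, hend]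
    -- start ≤ end and end < n
    have hse : l / n ≤ r / n := by
      rw [Int.le_ediv_iff_mul_le hn0]
      calc l / n * n = n * (l / n) := by ring
        _ ≤ r := hA
    have hen : r / n < n := by
      by_contra h
      push_neg at h
      have : n * n ≤ n * (r / n) := mul_le_mul_of_nonneg_left h (by omega)
      omega
    have hcnt : r / n + 1 = l / n + (((r / n + 1 - l / n).toNat : Nat) : Int) := by omega
    rw [hcnt, pvArr_init]
    rw [pvOuter_fold n hn ((r / n + 1 - l / n).toNat) (l / n) 0 [] le_rfl hq0 (by omega)]
    rw [pvFlatten_rows n hn ((r / n + 1 - l / n).toNat) (l / n) hq0]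
    rw [List.nil_append]
    rw [show (l / n + (((r / n + 1 - l / n).toNat : Nat) : Int)) * n = n * (r / n) + n by
      rw [← hcnt]; ring]
    rw [PySem.Int.mod_eq_emod_of_pos hn0]
    have hAeq : l / n * n = n * (l / n) := by ring
    by_cases hlr : l ≤ r
    · -- main case: the slice picks exactly the window [l, r]
      rw [PySem.List.pyRange_one_append (l / n * n) l (n * (r / n) + n) (by omega) (by omega)]
      rw [PySem.List.pyRange_one_append l (r + 1) (n * (r / n) + n) (by omega) (by omega)]
      rw [List.map_append, List.map_append]
      rw [PySem.List.slice_toNat _ (show (0:Int) ≤ l % n by omega)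
        (show (0:Int) ≤ l % n + (r - l) + 1 by omega)]
      rw [show (l % n).toNat = ((PySem.List.pyRange (l / n * n) l 1).map (pvF n)).length by
        simp [PySem.List.length_pyRange_one]; omega]
      rw [List.drop_left]
      rw [show (l % n + (r - l) + 1).toNat - ((PySem.List.pyRange (l / n * n) l 1).map (pvF n)).length
          = ((PySem.List.pyRange l (r + 1) 1).map (pvF n)).length by
        simp [PySem.List.length_pyRange_one]; omega]
      rw [List.take_left]
    · -- empty window inside the first generated row: both sides are empty
      push_neg at hlr
      rw [PySem.List.slice_toNat _ (show (0:Int) ≤ l % n by omega)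
        (show (0:Int) ≤ l % n + (r - l) + 1 by omega)]
      rw [show (l % n + (r - l) + 1).toNat - (l % n).toNat = 0 by omega]
      rw [List.take_zero]
      rw [PySem.List.pyRange_one_eq_nil (by omega : r + 1 ≤ l)]
      simp

-- ===== VERDICT (by name: the statement is the Claim_ definition above) =====
theorem solution_spec : Claim_equal_solution := by
  intro n l r _ hpre
  unfold Spec_solution
  exact solution_spec' n l r hpre.1 hpre.2.1 hpre.2.2
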